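-- pv_equiv track=rewrite | github.com/reza-asad/3DSSR | scripts/build_queries.py | map_cat_to_objects
-- ===== SOURCE A (Python) =====
-- def map_cat_to_objects(graph, accepted_cats):
--     cat_to_objects = {}
--     for node, node_info in graph.items():
--         cat = node_info['category'][0]
--         if cat in accepted_cats:
--             if cat not in cat_to_objects:
--                 cat_to_objects[cat] = [node]
--             else:
--                 cat_to_objects[cat].append(node)
--
--     return cat_to_objects
-- ===== SOURCE B (Python) =====
-- def map_cat_to_objects(graph, accepted_cats):
--     accepted = set(accepted_cats)
--     pairs = [(info['category'][0], node) for node, info in graph.items()]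
--     cats = list(dict.fromkeys(c for c, _ in pairs if c in accepted))
--     return {cat: [node for c, node in pairs if c == cat] for cat in cats}
-- ===== Notes on version B (the rewrite author's own statement) =====
-- stated objective: alternative
-- what changed: Replaces the single-pass dict accumulation (membership test then create-or-append per node) by a declarative pipeline: extract all (category, node) pairs once, take the ordered deduplicated accepted categories, and build each category's node list by a comprehension over the pair list.
import Mathlib
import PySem

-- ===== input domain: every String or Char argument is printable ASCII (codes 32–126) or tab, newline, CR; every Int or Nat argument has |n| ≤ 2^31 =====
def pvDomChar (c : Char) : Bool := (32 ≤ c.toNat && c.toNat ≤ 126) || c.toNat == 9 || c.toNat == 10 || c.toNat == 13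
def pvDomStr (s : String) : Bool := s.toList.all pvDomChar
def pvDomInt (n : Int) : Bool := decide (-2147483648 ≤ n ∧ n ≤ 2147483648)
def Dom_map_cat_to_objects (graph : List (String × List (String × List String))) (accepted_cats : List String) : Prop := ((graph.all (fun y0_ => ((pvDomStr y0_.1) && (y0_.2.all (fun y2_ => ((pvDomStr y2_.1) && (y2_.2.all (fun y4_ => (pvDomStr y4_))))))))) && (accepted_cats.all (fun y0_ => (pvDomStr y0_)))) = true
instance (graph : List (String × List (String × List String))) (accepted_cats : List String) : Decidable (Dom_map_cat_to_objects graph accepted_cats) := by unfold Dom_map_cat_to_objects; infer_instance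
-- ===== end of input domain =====

-- B groups by a declarative pipeline (pair list, ordered dedup of accepted cats, per-cat comprehension)
-- instead of A's single-pass create-or-append dict loop; equal return value, same key order (alternative, not faster).


-- ===== PORT A =====
def map_cat_to_objects (graph : List (String × List (String × List String))) (accepted_cats : List String) : List (String × List String) :=
  (graph.foldl (fun (acc : PySem.Dict String (List String)) pr =>
      let cat : String :=
        match (PySem.Dict.ofList pr.2).get? "category" with
        | some (c :: _) => c
        | _ => ""   -- unreachable under Pre_: Python raises KeyError/IndexError here
      if accepted_cats.contains cat then
        if !acc.contains cat then acc.insert cat [pr.1]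
        else acc.modify cat [] (fun xs => xs ++ [pr.1])
      else acc)
    PySem.Dict.empty).items

-- ===== PORT B =====
def map_cat_to_objects_alt (graph : List (String × List (String × List String))) (accepted_cats : List String) : List (String × List String) :=
  let accepted : PySem.Set String := PySem.Set.ofList accepted_cats
  -- info['category'][0]: dict lookup then index 0; the defaults are unreachable under Pre_
  let pairs : List (String × String) := graph.map (fun pr =>
      ((PySem.List.pyGet? (((PySem.Dict.ofList pr.2).get? "category").getD []) 0).getD "", pr.1))
  let cats : List String :=
    PySem.List.dedup ((pairs.filter (fun p => PySem.Set.contains accepted p.1)).map Prod.fst)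
  cats.map (fun c => (c, (pairs.filter (fun p => p.1 == c)).map Prod.snd))

-- ===== PRECONDITION & SPEC =====
-- Pre_ excludes exactly the inputs where Python A raises: a node_info whose 'category' key is
-- missing (KeyError) or maps to an empty list (IndexError on [0]).
def Pre_map_cat_to_objects (graph : List (String × List (String × List String))) (accepted_cats : List String) : Prop :=
  graph.all (fun pr => !((PySem.Dict.ofList pr.2).getD "category" []).isEmpty) = true
instance (graph : List (String × List (String × List String))) (accepted_cats : List String) : Decidable (Pre_map_cat_to_objects graph accepted_cats) := by unfold Pre_map_cat_to_objects; infer_instance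
def pvWitness_map_cat_to_objects : (List (String × List (String × List String))) × List String :=
  ([("n1", [("category", ["chair"])]), ("n2", [("category", ["table"])])], ["chair", "table"])
def Spec_map_cat_to_objects (graph : List (String × List (String × List String))) (accepted_cats : List String) (out : List (String × List String)) : Prop := out = map_cat_to_objects_alt graph accepted_cats
instance (graph : List (String × List (String × List String))) (accepted_cats : List String) (out : List (String × List String)) : Decidable (Spec_map_cat_to_objects graph accepted_cats out) := by unfold Spec_map_cat_to_objects; infer_instance

-- ===== CLAIM (what is proved, stated in full; the proofs are below) =====
def Claim_equal_map_cat_to_objects : Prop := ∀ (graph : List (String × List (String × List String))) (accepted_cats : List String), Dom_map_cat_to_objects graph accepted_cats → Pre_map_cat_to_objects graph accepted_cats → Spec_map_cat_to_objects graph accepted_cats (map_cat_to_objects graph accepted_cats)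

-- ===== LEMMAS AND PROOFS =====

-- the category of a node_info, as both ports compute it
def pvCat (info : List (String × List String)) : String :=
  match (PySem.Dict.ofList info).get? "category" with
  | some (c :: _) => c
  | _ => ""

theorem pv_cat_eq (info : List (String × List String)) :
    (PySem.List.pyGet? (((PySem.Dict.ofList info).get? "category").getD []) 0).getD "" = pvCat info := by
  unfold pvCat
  cases h : (PySem.Dict.ofList info).get? "category" with
  | none => simp [PySem.List.pyGet?]
  | some l => cases l <;> simp [PySem.List.pyGet?, PySem.List.pyIdx?]

def pvPairs (graph : List (String × List (String × List String))) : List (String × String) :=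
  graph.map (fun pr => (pvCat pr.2, pr.1))

-- when the key is absent, A's insert of the fresh singleton IS a modify with default []
theorem pv_insert_eq_modify (d : PySem.Dict String (List String)) (k : String) (n : String)
    (h : d.contains k = false) : d.insert k [n] = d.modify k [] (fun xs => xs ++ [n]) := by
  simp [PySem.Dict.modify, PySem.Dict.getD_of_not_contains, h]

theorem pv_set_contains (l : List String) (x : String) :
    PySem.Set.contains (PySem.Set.ofList l) x = l.contains x := by
  rw [PySem.Set.contains_eq_listContains]
  simp [PySem.Set.mem_ofList]

-- A's fold equals the plain modify-fold over the accepted (cat, node) pairs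
theorem pv_A_fold (graph : List (String × List (String × List String))) (accepted_cats : List String) :
    map_cat_to_objects graph accepted_cats =
      (((pvPairs graph).filter (fun p => accepted_cats.contains p.1)).foldl
        (fun d p => d.modify p.1 [] (fun xs => xs ++ [p.2])) PySem.Dict.empty).items := by
  unfold map_cat_to_objects
  rw [List.foldl_filter]
  unfold pvPairs
  rw [List.foldl_map]
  congr 1
  apply PySem.List.foldl_congr_mem
  intro d pr _
  show (if accepted_cats.contains (pvCat pr.2) = true then
          if (!d.contains (pvCat pr.2)) = true then d.insert (pvCat pr.2) [pr.1]
          else d.modify (pvCat pr.2) [] (fun xs => xs ++ [pr.1])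
        else d)
      = (if accepted_cats.contains (pvCat pr.2) = true then
          d.modify (pvCat pr.2) [] (fun xs => xs ++ [pr.1]) else d)
  split_ifs with h1 h2
  · exact pv_insert_eq_modify d _ pr.1 (by simpa using h2)
  · rfl
  · rfl

theorem map_cat_to_objects_spec' (graph : List (String × List (String × List String))) (accepted_cats : List String) :
    map_cat_to_objects graph accepted_cats = map_cat_to_objects_alt graph accepted_cats := by
  have hpairsB : (graph.map (fun pr =>
      ((PySem.List.pyGet? (((PySem.Dict.ofList pr.2).get? "category").getD []) 0).getD "", pr.1)))
      = pvPairs graph := by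
    unfold pvPairs
    simp only [pv_cat_eq]
  rw [pv_A_fold]
  simp only [map_cat_to_objects_alt]
  rw [hpairsB]
  set pairs := pvPairs graph with hpairs
  set L := pairs.filter (fun p => accepted_cats.contains p.1) with hL
  set D := L.foldl (fun d p => d.modify p.1 [] (fun xs => xs ++ [p.2])) PySem.Dict.empty with hD
  -- keys of D, nodup
  have hkeys : D.keys = PySem.Set.ofList (L.map Prod.fst) := by
    rw [hD, PySem.Dict.keys_foldl_modify_key L Prod.fst [] (fun _ p => fun xs => xs ++ [p.2])]
    simp [PySem.Set.update_nil_left]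
  have hnd : D.keys.Nodup := by
    rw [hkeys]; exact PySem.Set.nodup_ofList _
  -- items of D as a map over its keys
  rw [PySem.Dict.items_eq_map_keys D hnd []]
  -- B's filter condition is A's
  have hfilt : (pairs.filter (fun p => PySem.Set.contains (PySem.Set.ofList accepted_cats) p.1))
      = L := by
    rw [hL]; apply List.filter_congr; intro p _; rw [pv_set_contains]
  rw [hkeys, hfilt, PySem.List.dedup_eq_ofList]
  apply List.map_congr_left
  intro c hc
  have hc' : accepted_cats.contains c = true := by
    have hm := (PySem.Set.mem_ofList (xs := L.map Prod.fst) (y := c)).mp hc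
    obtain ⟨p, hp, hpc⟩ := List.mem_map.mp hm
    rw [hL] at hp
    have := List.of_mem_filter hp
    simpa [hpc] using this
  have hgetD : D.getD c [] = (L.filter (fun p => p.1 == c)).map (fun p => p.2) := by
    rw [hD, PySem.Dict.getD_foldl_modify_append]
    simp
  rw [hgetD, hL, List.filter_filter]
  congr 2
  apply List.filter_congr
  intro p _
  by_cases h : p.1 = c
  · simp [h]
    simpa using hc'
  · simp [h]

-- ===== VERDICT (by name: the statement is the Claim_ definition above) =====
theorem map_cat_to_objects_spec : Claim_equal_map_cat_to_objects := by
  intro graph accepted_cats _ _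
  exact map_cat_to_objects_spec' graph accepted_cats
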